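-- pv_equiv track=rewrite | github.com/ChrisDavison/advent-of-code | 2023/day15.py | puzzlehash
-- ===== SOURCE A (Python) =====
-- def puzzlehash(s):
--     h = 0
--     for ch in s:
--         o = ord(ch)
--         h += o
--         h *= 17
--         h %= 256
--     return h
-- ===== SOURCE B (Python) =====
-- def puzzlehash(s):
--     total = 0
--     w = 1
--     for ch in reversed(s):
--         w = (w * 17) % 256
--         total += ord(ch) * w
--     return total % 256
-- ===== Notes on version B (the rewrite author's own statement) =====
-- stated objective: alternative
-- what changed: B uses the closed form h = sum ord(s[i])*17^(n-i) mod 256: it walks the string in reverse maintaining a running power of 17 mod 256 and a weighted sum, taking one final mod, instead of A's incremental add-multiply-mod state.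
import Mathlib
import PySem

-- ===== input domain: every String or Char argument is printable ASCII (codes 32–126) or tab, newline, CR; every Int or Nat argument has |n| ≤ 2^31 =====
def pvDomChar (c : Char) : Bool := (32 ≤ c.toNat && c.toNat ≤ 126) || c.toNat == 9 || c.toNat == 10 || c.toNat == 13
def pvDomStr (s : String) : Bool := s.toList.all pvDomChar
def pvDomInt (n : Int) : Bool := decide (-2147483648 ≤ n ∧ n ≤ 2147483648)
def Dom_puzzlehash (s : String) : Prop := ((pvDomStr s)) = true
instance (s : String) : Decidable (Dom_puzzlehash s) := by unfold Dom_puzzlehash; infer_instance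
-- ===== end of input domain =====

-- B computes the same AoC hash via the closed form Σ ord(s[i])·17^(n−i) mod 256: a reverse pass
-- maintaining a running power of 17 and one weighted sum, with a single final mod (alternative decomposition).

-- ===== PORT A =====
def puzzlehash (s : String) : Int :=
  s.toList.foldl (fun h ch => PySem.Int.mod ((h + (ch.toNat : Int)) * 17) 256) 0

-- ===== PORT B =====
def puzzlehash_alt (s : String) : Int :=
  let p := s.toList.reverse.foldl
    (fun (p : Int × Int) ch =>
      let w := PySem.Int.mod (p.2 * 17) 256
      (p.1 + (ch.toNat : Int) * w, w)) ((0 : Int), (1 : Int))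
  PySem.Int.mod p.1 256

-- ===== PRECONDITION & SPEC =====
def Spec_puzzlehash (s : String) (out : Int) : Prop := out = puzzlehash_alt s
instance (s : String) (out : Int) : Decidable (Spec_puzzlehash s out) := by unfold Spec_puzzlehash; infer_instance

-- ===== CLAIM (what is proved, stated in full; the proofs are below) =====
def Claim_equal_puzzlehash : Prop := ∀ (s : String), Dom_puzzlehash s → Spec_puzzlehash s (puzzlehash s)

-- ===== LEMMAS AND PROOFS =====

-- weighted value of a character list: pvV [c0,c1,…] = c0 + 17·c1 + 17²·c2 + …
def pvV : List Char → Int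
  | [] => 0
  | c :: cs => (c.toNat : Int) + 17 * pvV cs

theorem pvV_append (xs : List Char) (c : Char) :
    pvV (xs ++ [c]) = pvV xs + 17 ^ xs.length * (c.toNat : Int) := by
  induction xs with
  | nil => simp [pvV]
  | cons x xs ih => simp [pvV, ih, pow_succ]; ring

theorem pv_hmod (a : Int) : PySem.Int.mod a 256 = a % 256 :=
  PySem.Int.mod_eq_emod_of_pos (by norm_num)

-- B's fold invariant
theorem pvBfold (l : List Char) : ∀ (t w : Int),
    (l.foldl (fun (p : Int × Int) ch =>
      (p.1 + (ch.toNat : Int) * ((p.2 * 17) % 256), (p.2 * 17) % 256)) (t, w)).1 % 256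
      = (t + w * 17 * pvV l) % 256 := by
  induction l with
  | nil => intro t w; simp [pvV]
  | cons c cs ih =>
    intro t w
    simp only [List.foldl]
    rw [ih]
    have hm : Int.ModEq 256 ((w * 17) % 256) (w * 17) :=
      Int.emod_emod_of_dvd _ dvd_rfl
    show Int.ModEq 256 _ _
    have h1 : Int.ModEq 256
        (t + (c.toNat : Int) * ((w * 17) % 256) + ((w * 17) % 256) * 17 * pvV cs)
        (t + (c.toNat : Int) * (w * 17) + (w * 17) * 17 * pvV cs) :=
      ((Int.ModEq.refl t).add ((Int.ModEq.refl _).mul hm)).add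
        ((hm.mul (Int.ModEq.refl 17)).mul (Int.ModEq.refl (pvV cs)))
    have h2 : t + (c.toNat : Int) * (w * 17) + (w * 17) * 17 * pvV cs
        = t + w * 17 * pvV (c :: cs) := by simp [pvV]; ring
    rw [← h2]; exact h1

-- A's fold in closed form
theorem pvAfold (l : List Char) : ∀ (h : Int), h % 256 = h →
    l.foldl (fun h c => ((h + (c.toNat : Int)) * 17) % 256) h
      = (h * 17 ^ l.length + 17 * pvV l.reverse) % 256 := by
  induction l with
  | nil => intro h hh; simpa [pvV] using hh.symm
  | cons c cs ih =>
    intro h hh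
    simp only [List.foldl]
    rw [ih _ (Int.emod_emod_of_dvd _ dvd_rfl)]
    have hm : Int.ModEq 256 (((h + (c.toNat : Int)) * 17) % 256) ((h + (c.toNat : Int)) * 17) :=
      Int.emod_emod_of_dvd _ dvd_rfl
    show Int.ModEq 256 _ _
    have h1 : Int.ModEq 256
        ((((h + (c.toNat : Int)) * 17) % 256) * 17 ^ cs.length + 17 * pvV cs.reverse)
        (((h + (c.toNat : Int)) * 17) * 17 ^ cs.length + 17 * pvV cs.reverse) :=
      (hm.mul (Int.ModEq.refl _)).add (Int.ModEq.refl _)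
    have h2 : ((h + (c.toNat : Int)) * 17) * 17 ^ cs.length + 17 * pvV cs.reverse
        = h * 17 ^ (c :: cs).length + 17 * pvV (c :: cs).reverse := by
      simp [List.reverse_cons, pvV_append, pow_succ]; ring
    rw [← h2]; exact h1

-- ===== VERDICT (by name: the statement is the Claim_ definition above) =====
theorem puzzlehash_spec : Claim_equal_puzzlehash := by
  intro s _
  unfold Spec_puzzlehash puzzlehash puzzlehash_alt
  simp only [pv_hmod]
  rw [pvAfold _ 0 rfl, pvBfold]
  simp
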